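-- pv_equiv track=rewrite | github.com/MaisyZhang/Diffie-Hellman-Algorithm | DHAttack.py | calc_shared_key
-- ===== SOURCE A (Python) =====
-- def calc_shared_key(A, B, p, g):
--     a, b = None, None
--     for x in range(1, p):
--         if (g ** x) % p == A:
--             a = x
--         if (g ** x) % p == B:
--             b = x
--     return a, b
-- ===== SOURCE B (Python) =====
-- def calc_shared_key(A, B, p, g):
--     # Build a value -> exponent index with a running modular power (no big g**x),
--     # ascending x so later duplicates overwrite (largest matching exponent wins).
--     logs = {}
--     cur = 1
--     for x in range(1, p):
--         cur = (cur * g) % p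
--         logs[cur] = x
--     return logs.get(A), logs.get(B)
-- ===== Notes on version B (the rewrite author's own statement) =====
-- stated objective: faster
-- what changed: B keeps a running modular power (cur = cur*g % p) instead of recomputing the huge g**x twice per iteration, builds a full value->exponent dict in one ascending pass (last write wins, like A's last match), and answers both discrete logs by two dict lookups after the loop.
import Mathlib
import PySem

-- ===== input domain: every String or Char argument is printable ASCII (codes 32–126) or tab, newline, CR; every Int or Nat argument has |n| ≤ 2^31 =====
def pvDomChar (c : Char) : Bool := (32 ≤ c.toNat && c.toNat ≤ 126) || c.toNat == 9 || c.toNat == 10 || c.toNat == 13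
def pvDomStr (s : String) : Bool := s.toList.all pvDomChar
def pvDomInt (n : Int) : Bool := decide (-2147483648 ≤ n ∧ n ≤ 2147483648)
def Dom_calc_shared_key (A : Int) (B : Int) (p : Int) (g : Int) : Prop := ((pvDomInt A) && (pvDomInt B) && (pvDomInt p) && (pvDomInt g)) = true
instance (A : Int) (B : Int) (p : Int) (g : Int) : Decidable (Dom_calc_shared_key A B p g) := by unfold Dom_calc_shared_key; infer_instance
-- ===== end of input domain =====

-- B replaces A's two running candidates and per-step recomputation of g**x by a running
-- modular power and a value→exponent dict built in one pass, queried after the loop (faster).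

-- ===== PORT A =====
-- loop body: x ranges over range(1, p), so x ≥ 1 and g ** x is g ^ x.toNat exactly
def calc_shared_key (A : Int) (B : Int) (p : Int) (g : Int) : Option Int × Option Int :=
  (PySem.List.pyRange 1 p 1).foldl
    (fun (s : Option Int × Option Int) x =>
      ((if PySem.Int.mod (g ^ x.toNat) p = A then some x else s.1),
       (if PySem.Int.mod (g ^ x.toNat) p = B then some x else s.2)))
    (none, none)

-- ===== PORT B =====
def calc_shared_key_alt (A : Int) (B : Int) (p : Int) (g : Int) : Option Int × Option Int :=
  let st := (PySem.List.pyRange 1 p 1).foldl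
    (fun (s : PySem.Dict Int Int × Int) x =>
      let cur := PySem.Int.mod (s.2 * g) p
      (s.1.insert cur x, cur))
    (PySem.Dict.empty, 1)
  (st.1.get? A, st.1.get? B)

-- ===== PRECONDITION & SPEC =====
def Spec_calc_shared_key (A : Int) (B : Int) (p : Int) (g : Int) (out : Option Int × Option Int) : Prop := out = calc_shared_key_alt A B p g
instance (A : Int) (B : Int) (p : Int) (g : Int) (out : Option Int × Option Int) : Decidable (Spec_calc_shared_key A B p g out) := by unfold Spec_calc_shared_key; infer_instance

-- ===== CLAIM (what is proved, stated in full; the proofs are below) =====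
def Claim_equal_calc_shared_key : Prop := ∀ (A : Int) (B : Int) (p : Int) (g : Int), Dom_calc_shared_key A B p g → Spec_calc_shared_key A B p g (calc_shared_key A B p g)

-- ===== LEMMAS AND PROOFS =====

-- Invariant: starting A's fold from the lookups of B's current dict, with the running power
-- congruent to g^(s-1) mod p, both loops produce the same final pair of lookups.
lemma pv_loop_inv (A B p g : Int) (hp : 0 < p) :
    ∀ (n : Nat) (s : Int), (p - s).toNat = n → 1 ≤ s →
    ∀ (d : PySem.Dict Int Int) (cur : Int),
      PySem.Int.mod cur p = PySem.Int.mod (g ^ (s - 1).toNat) p →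
      (PySem.List.pyRange s p 1).foldl
          (fun (st : Option Int × Option Int) x =>
            ((if PySem.Int.mod (g ^ x.toNat) p = A then some x else st.1),
             (if PySem.Int.mod (g ^ x.toNat) p = B then some x else st.2)))
          (d.get? A, d.get? B)
        = (let st := (PySem.List.pyRange s p 1).foldl
              (fun (s : PySem.Dict Int Int × Int) x =>
                let cur := PySem.Int.mod (s.2 * g) p
                (s.1.insert cur x, cur))
              (d, cur)
           (st.1.get? A, st.1.get? B)) := by
  intro n
  induction n with
  | zero =>
    intro s hn hs d cur hcur
    have hps : p ≤ s := by omega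
    rw [PySem.List.pyRange_one_eq_nil hps]
    simp
  | succ n ih =>
    intro s hn hs d cur hcur
    have hsp : s < p := by omega
    rw [PySem.List.pyRange_one_cons hsp]
    simp only [List.foldl_cons]
    -- the new running power equals g^s mod p
    have hcur' : PySem.Int.mod (cur * g) p = PySem.Int.mod (g ^ s.toNat) p := by
      have key : ∀ a b : Int, (a % p) * b % p = a * b % p := by
        intro a b
        conv_rhs => rw [Int.mul_emod]
        conv_lhs => rw [Int.mul_emod, Int.emod_emod_of_dvd a (dvd_refl p)]
      rw [PySem.Int.mod_eq_emod_of_pos hp, PySem.Int.mod_eq_emod_of_pos hp]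
      have h2 : PySem.Int.mod cur p = cur % p := PySem.Int.mod_eq_emod_of_pos hp
      have h3 : PySem.Int.mod (g ^ (s - 1).toNat) p = g ^ (s - 1).toNat % p :=
        PySem.Int.mod_eq_emod_of_pos hp
      rw [← key cur g, h2.symm.trans (hcur.trans h3), key, ← pow_succ]
      congr 2
      omega
    -- a second reduction is the identity
    have hidem : PySem.Int.mod (PySem.Int.mod (cur * g) p) p
        = PySem.Int.mod (g ^ ((s + 1) - 1).toNat) p := by
      rw [hcur']
      rw [PySem.Int.mod_eq_emod_of_pos hp, PySem.Int.mod_eq_emod_of_pos hp,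
        PySem.Int.mod_eq_emod_of_pos hp]
      rw [Int.emod_emod_of_dvd _ (dvd_refl p)]
      congr 2
      omega
    have hd : ((if PySem.Int.mod (g ^ s.toNat) p = A then some s else d.get? A),
              (if PySem.Int.mod (g ^ s.toNat) p = B then some s else d.get? B))
        = ((d.insert (PySem.Int.mod (cur * g) p) s).get? A,
           (d.insert (PySem.Int.mod (cur * g) p) s).get? B) := by
      rw [PySem.Dict.get?_insert, PySem.Dict.get?_insert, hcur']
      simp [eq_comm]
    rw [hd]
    have := ih (s + 1) (by omega) (by omega)
      (d.insert (PySem.Int.mod (cur * g) p) s) (PySem.Int.mod (cur * g) p) hidem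
    simpa using this

-- ===== VERDICT (by name: the statement is the Claim_ definition above) =====
theorem calc_shared_key_spec : Claim_equal_calc_shared_key := by
  intro A B p g _
  unfold Spec_calc_shared_key calc_shared_key calc_shared_key_alt
  by_cases hp : p ≤ 1
  · rw [PySem.List.pyRange_one_eq_nil hp]
    simp
  · have hp0 : 0 < p := by omega
    have h0 : (PySem.Dict.empty : PySem.Dict Int Int).get? A = none := PySem.Dict.get?_empty _
    have h1 : (PySem.Dict.empty : PySem.Dict Int Int).get? B = none := PySem.Dict.get?_empty _
    have hcur : PySem.Int.mod (1 : Int) p = PySem.Int.mod (g ^ ((1 : Int) - 1).toNat) p := by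
      norm_num
    have := pv_loop_inv A B p g hp0 (p - 1).toNat 1 rfl le_rfl PySem.Dict.empty 1 hcur
    rw [h0, h1] at this
    simpa using this
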